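-- pv_equiv track=rewrite | github.com/addygeek/excel-ai-clinical-nlp | ner_module.py | get_entities_by_type
-- ===== SOURCE A (Python) =====
-- from typing import List, Dict, Tuple
--
-- def get_entities_by_type(entities: List[Dict]) -> Dict[str, List[str]]:
--     """
--     Group entities by type
--
--     Args:
--         entities: List of entity dict
--
--     Returns:
--         Dictionary mapping entity type to list of entity texts
--     """
--     grouped = {}
--
--     for entity in entities:
--         entity_type = entity.get('type', 'UNKNOWN')
--         entity_text = entity.get('text', '')
--
--         if entity_type not in grouped:
--             grouped[entity_type] = []
--
--         if entity_text not in grouped[entity_type]: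
--             grouped[entity_type].append(entity_text)
--
--     return grouped
-- ===== SOURCE B (Python) =====
-- def get_entities_by_type(entities):
--     pairs = [(e.get('type', 'UNKNOWN'), e.get('text', '')) for e in entities]
--     types = list(dict.fromkeys(t for t, _ in pairs))
--     return {t: list(dict.fromkeys(x for u, x in pairs if u == t)) for t in types}
-- ===== Notes on version B (the rewrite author's own statement) =====
-- stated objective: alternative
-- what changed: Replaces A's single incrementally-built dict (per-entity membership check and conditional append) by a pairs-then-per-type construction: extract all (type, text) pairs once, compute the distinct types in first-occurrence order, then build each group's value with a separate scan over the pairs filtered to that type, deduplicated by dict.fromkeys.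
import Mathlib
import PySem

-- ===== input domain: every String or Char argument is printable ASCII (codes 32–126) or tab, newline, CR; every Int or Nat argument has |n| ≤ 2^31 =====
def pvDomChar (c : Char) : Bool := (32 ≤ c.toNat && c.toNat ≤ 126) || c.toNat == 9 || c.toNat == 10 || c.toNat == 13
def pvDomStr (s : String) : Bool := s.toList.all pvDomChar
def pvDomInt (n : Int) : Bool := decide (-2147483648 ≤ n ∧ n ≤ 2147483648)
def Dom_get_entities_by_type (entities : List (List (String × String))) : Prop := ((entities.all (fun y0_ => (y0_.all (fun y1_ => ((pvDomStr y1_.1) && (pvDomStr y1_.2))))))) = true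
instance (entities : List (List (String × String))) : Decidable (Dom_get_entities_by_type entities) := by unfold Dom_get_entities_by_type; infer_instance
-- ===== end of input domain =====

-- B abandons A's incrementally-built dict: it extracts the (type, text) pairs once, lists the
-- distinct types, then builds each group by a per-type scan of the pairs (objective: alternative).

-- ===== PORT A =====
def get_entities_by_type (entities : List (List (String × String))) : List (String × List String) :=
  (entities.foldl (fun (grouped : PySem.Dict String (List String)) entity =>
      let entity_type := (PySem.Dict.mk entity).getD "type" "UNKNOWN"
      let entity_text := (PySem.Dict.mk entity).getD "text" ""
      let grouped := if grouped.contains entity_type then grouped else grouped.insert entity_type []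
      if entity_text ∈ grouped.getD entity_type [] then grouped
      else grouped.modify entity_type [] (· ++ [entity_text])
    ) PySem.Dict.empty).items

-- ===== PORT B =====
def get_entities_by_type_alt (entities : List (List (String × String))) : List (String × List String) :=
  let pairs := entities.map (fun e =>
    ((PySem.Dict.mk e).getD "type" "UNKNOWN", (PySem.Dict.mk e).getD "text" ""))
  let types := PySem.List.dedup (pairs.map Prod.fst)
  types.map (fun t => (t, PySem.List.dedup ((pairs.filter (fun p => p.1 == t)).map Prod.snd)))

-- ===== PRECONDITION & SPEC =====
def Spec_get_entities_by_type (entities : List (List (String × String))) (out : List (String × List String)) : Prop := out = get_entities_by_type_alt entities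
instance (entities : List (List (String × String))) (out : List (String × List String)) : Decidable (Spec_get_entities_by_type entities out) := by unfold Spec_get_entities_by_type; infer_instance

-- ===== CLAIM (what is proved, stated in full; the proofs are below) =====
def Claim_equal_get_entities_by_type : Prop := ∀ (entities : List (List (String × String))), Dom_get_entities_by_type entities → Spec_get_entities_by_type entities (get_entities_by_type entities)

-- ===== LEMMAS AND PROOFS =====

-- A's fold step, expressed on a (type, text) pair
def pvStepA (grouped : PySem.Dict String (List String)) (p : String × String) : PySem.Dict String (List String) :=
  let grouped := if grouped.contains p.1 then grouped else grouped.insert p.1 []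
  if p.2 ∈ grouped.getD p.1 [] then grouped
  else grouped.modify p.1 [] (· ++ [p.2])

lemma dedup_append_singleton {α : Type} [DecidableEq α] (l : List α) (x : α) :
    PySem.List.dedup (l ++ [x]) = if x ∈ l then PySem.List.dedup l else PySem.List.dedup l ++ [x] := by
  simp only [PySem.List.dedup_eq_ofList, PySem.Set.ofList_append, PySem.Set.update_cons, PySem.Set.update_nil]
  simp [PySem.Set.add, PySem.Set.contains, PySem.Set.mem_ofList]

lemma pvStepA_keys (d : PySem.Dict String (List String)) (p : String × String) :
    (pvStepA d p).keys = if p.1 ∈ d.keys then d.keys else d.keys ++ [p.1] := by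
  unfold pvStepA
  by_cases hc : d.contains p.1 = true
  · have hm : p.1 ∈ d.keys := (PySem.Dict.contains_iff_mem_keys d p.1).mp hc
    simp only [hc, if_true, hm]
    split
    · rfl
    · rw [PySem.Dict.keys_modify, PySem.Dict.keys_insert_of_contains _ _ hc]
  · have hc' : d.contains p.1 = false := by simpa using hc
    have hm : p.1 ∉ d.keys := fun h => hc ((PySem.Dict.contains_iff_mem_keys d p.1).mpr h)
    simp only [hc', Bool.false_eq_true, if_false, hm]
    rw [PySem.Dict.getD_insert_self]
    simp only [List.not_mem_nil, if_false]
    rw [PySem.Dict.keys_modify, PySem.Dict.keys_insert_of_contains _ _ (PySem.Dict.contains_insert_self _ _ _),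
      PySem.Dict.keys_insert_of_not_contains _ _ hc']

lemma pvStepA_getD (d : PySem.Dict String (List String)) (p : String × String) (k : String) :
    (pvStepA d p).getD k [] =
      if k = p.1 then (if p.2 ∈ d.getD p.1 [] then d.getD p.1 [] else d.getD p.1 [] ++ [p.2])
      else d.getD k [] := by
  unfold pvStepA
  by_cases hc : d.contains p.1 = true
  · simp only [hc, if_true]
    by_cases hm : p.2 ∈ d.getD p.1 []
    · simp only [hm, if_true]
      by_cases hk : k = p.1
      · subst hk; simp
      · rw [if_neg hk]
    · simp only [hm, if_false]
      rw [PySem.Dict.getD_modify]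
  · have hc' : d.contains p.1 = false := by simpa using hc
    have hd : d.getD p.1 ([] : List String) = [] := PySem.Dict.getD_of_not_contains _ _ hc'
    simp only [hc', Bool.false_eq_true, if_false]
    rw [PySem.Dict.getD_insert_self]
    simp only [List.not_mem_nil, if_false]
    rw [PySem.Dict.getD_modify, hd]
    by_cases hk : k = p.1
    · subst hk; simp [PySem.Dict.getD_insert_self]
    · rw [if_neg hk, if_neg hk, PySem.Dict.getD_insert_of_ne _ _ _ hk]

-- characterisation of A's fold over a pair list
lemma pv_fold_char (ps : List (String × String)) :
    (ps.foldl pvStepA PySem.Dict.empty).keys = PySem.List.dedup (ps.map Prod.fst) ∧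
    ∀ k, (ps.foldl pvStepA PySem.Dict.empty).getD k [] =
        PySem.List.dedup ((ps.filter (fun p => p.1 == k)).map Prod.snd) := by
  induction ps using List.reverseRecOn with
  | nil =>
    constructor
    · simp [PySem.Dict.keys_empty, PySem.List.dedup_eq_ofList, PySem.Set.ofList]
    · intro k; simp [PySem.Dict.getD_empty, PySem.List.dedup_eq_ofList, PySem.Set.ofList]
  | append_singleton ps p ih =>
    obtain ⟨ihk, ihg⟩ := ih
    rw [List.foldl_append, List.foldl_cons, List.foldl_nil]
    constructor
    · rw [pvStepA_keys, ihk, List.map_append, List.map_cons, List.map_nil,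
        dedup_append_singleton]
      by_cases h : p.1 ∈ List.map Prod.fst ps
      · simp [PySem.Set.mem_ofList, h]
      · simp [PySem.Set.mem_ofList, h]
    · intro k
      simp only [pvStepA_getD, ihg, List.filter_append, List.map_append]
      by_cases hk : k = p.1
      · subst hk
        rw [if_pos rfl]
        simp only [List.filter_cons, beq_self_eq_true, if_true, List.filter_nil,
          List.map_cons, List.map_nil]
        rw [dedup_append_singleton]
        simp [PySem.Set.mem_ofList]
      · rw [if_neg hk]
        have : (p.1 == k) = false := by simpa using fun h => hk h.symm
        simp [this]

-- ===== VERDICT (by name: the statement is the Claim_ definition above) =====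
theorem get_entities_by_type_spec : Claim_equal_get_entities_by_type := by
  intro entities _
  unfold Spec_get_entities_by_type get_entities_by_type get_entities_by_type_alt
  set pairs := entities.map (fun e =>
    ((PySem.Dict.mk e).getD "type" "UNKNOWN", (PySem.Dict.mk e).getD "text" "")) with hpairs
  have hfold : entities.foldl (fun (grouped : PySem.Dict String (List String)) entity =>
      let entity_type := (PySem.Dict.mk entity).getD "type" "UNKNOWN"
      let entity_text := (PySem.Dict.mk entity).getD "text" ""
      let grouped := if grouped.contains entity_type then grouped else grouped.insert entity_type []
      if entity_text ∈ grouped.getD entity_type [] then grouped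
      else grouped.modify entity_type [] (· ++ [entity_text])) PySem.Dict.empty
      = pairs.foldl pvStepA PySem.Dict.empty := by
    rw [hpairs, List.foldl_map]; rfl
  rw [hfold]
  obtain ⟨hk, hg⟩ := pv_fold_char pairs
  have hnd : (pairs.foldl pvStepA PySem.Dict.empty).keys.Nodup := by
    rw [hk, PySem.List.dedup_eq_ofList]; exact PySem.Set.nodup_ofList _
  rw [PySem.Dict.items_eq_map_keys _ hnd ([] : List String), hk]
  exact List.map_congr_left (fun k _ => by rw [hg k])
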